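-- pv_equiv track=rewrite | github.com/xa12t1t21t/Src | cfg/__init__.py | _sequentialize_copies
-- ===== SOURCE A (Python) =====
-- from typing import Dict, List, Set, Tuple, TYPE_CHECKING
--
-- def _sequentialize_copies(
--     copies: List[Tuple[str, str, int]]
-- ) -> List[Tuple[str, str, int]]:
--     """Convert parallel copies to a sequential ordering.
--
--     Given parallel copies {(dst1, src1), (dst2, src2), ...}, find a sequential
--     ordering that produces the same result. Uses a topological sort on the
--     dependency graph, with temporary variables for cycles.
--
--     Args:
--         copies: List of (dest_name, src_name, register) triples.
--
--     Returns:
--         Ordered list of (dest, src, register) copies to execute sequentially.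
--     """
--     if not copies:
--         return []
--
--     # Remove trivial copies (self-copies)
--     copies = [(d, s, r) for d, s, r in copies if d != s]
--     if not copies:
--         return []
--
--     # Build dependency graph: dest -> src
--     # A copy dst=src depends on src being available (not yet overwritten)
--     result = []
--     remaining = list(copies)
--     temp_counter = [0]
--
--     # Keep processing until all copies are placed
--     max_iterations = len(remaining) * 2 + 10  # safety limit
--     iteration = 0
--
--     while remaining and iteration < max_iterations:
--         iteration += 1
--         progress = False
--
--         # Find a copy whose destination is not a source of another remaining copy
--         i = 0
--         while i < len(remaining):
--             dest, src, reg = remaining[i]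
--             # Check if dest is used as a source by another copy
--             is_source = any(s == dest for d, s, _ in remaining if d != dest)
--             if not is_source:
--                 result.append(remaining.pop(i))
--                 progress = True
--             else:
--                 i += 1
--
--         if not progress and remaining:
--             # We have a cycle. Break it by introducing a temporary.
--             dest, src, reg = remaining[0]
--             temp_name = f"__ssa_tmp_{temp_counter[0]}"
--             temp_counter[0] += 1
--
--             # Save src to temp, then we can overwrite it
--             result.append((temp_name, src, reg))
--
--             # Replace src in remaining copies with temp
--             remaining[0] = (dest, temp_name, reg)
--
--     # Add any remaining copies (shouldn't happen with correct algorithm)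
--     result.extend(remaining)
--
--     return result
-- ===== SOURCE B (Python) =====
-- def _acquire(uses, d, s):
--     """Record that copy d=s reads s (self-copies never block anyone)."""
--     if d != s:
--         uses[s] = uses.get(s, 0) + 1
--
--
-- def _release(uses, d, s):
--     """Drop copy d=s's read of s."""
--     if d != s:
--         uses[s] = uses.get(s, 0) - 1
--
--
-- def _sequentialize_copies(copies):
--     """Sequentialize parallel copies: counting passes with an incrementally
--     maintained source-usage dict instead of a quadratic inner rescan."""
--     pending = [(d, s, r) for d, s, r in copies if d != s]
--     if not pending:
--         return []
--     result = []
--     # uses[x] = how many pending copies are blocked-on/reading x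
--     uses = {}
--     for d, s, _r in pending:
--         _acquire(uses, d, s)
--     temp_id = 0
--     fuel = 2 * len(pending) + 10  # same documented safety limit as the original
--     while pending and fuel > 0:
--         fuel -= 1
--         next_pending = []
--         emitted = False
--         for d, s, r in pending:
--             if uses.get(d, 0) == 0:
--                 result.append((d, s, r))
--                 _release(uses, d, s)
--                 emitted = True
--             else:
--                 next_pending.append((d, s, r))
--         pending = next_pending
--         if not emitted and pending:
--             d, s, r = pending[0]
--             temp = f"__ssa_tmp_{temp_id}"
--             temp_id += 1
--             result.append((temp, s, r))
--             _release(uses, d, s)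
--             _acquire(uses, d, temp)
--             pending[0] = (d, temp, r)
--     result.extend(pending)
--     return result
-- ===== Notes on version B (the rewrite author's own statement) =====
-- stated objective: faster
-- what changed: Replaces A's per-copy inner rescan of the whole remaining list (any(s == dest ...)) and in-place index/pop loop by an incrementally maintained dict of source-usage counts, emitting ready copies in the same pass order with an O(1) readiness test.
import Mathlib
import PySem

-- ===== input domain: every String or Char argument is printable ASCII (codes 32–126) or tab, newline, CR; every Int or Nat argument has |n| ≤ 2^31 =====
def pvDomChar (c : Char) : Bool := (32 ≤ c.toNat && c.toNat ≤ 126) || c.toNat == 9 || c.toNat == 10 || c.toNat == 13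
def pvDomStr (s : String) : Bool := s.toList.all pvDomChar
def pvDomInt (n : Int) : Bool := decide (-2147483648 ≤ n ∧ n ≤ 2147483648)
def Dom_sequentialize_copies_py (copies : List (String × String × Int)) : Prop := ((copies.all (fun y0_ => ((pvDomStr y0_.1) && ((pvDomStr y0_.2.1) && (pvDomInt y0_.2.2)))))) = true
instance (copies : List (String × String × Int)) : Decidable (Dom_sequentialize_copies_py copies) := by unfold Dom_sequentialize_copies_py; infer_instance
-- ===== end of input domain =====

-- B replaces A's quadratic inner "is this dest still used as a source?" rescan by an
-- incrementally maintained source-usage counter (a dict), keeping the same pass order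
-- and the same documented safety limit; objective: faster.

-- ===== PORT A =====
-- any(s == dest for d, s, _ in remaining if d != dest)
def pvIsSource (remaining : List (String × String × Int)) (dest : String) : Bool :=
  remaining.any (fun e => !(e.1 == dest) && (e.2.1 == dest))

-- A's inner while-loop: scan the list, popping ready copies (emitted in order) and
-- keeping blocked ones in `kept`; the membership test sees the whole current list.
def pvScanA : List (String × String × Int) → List (String × String × Int) →
    List (String × String × Int) × List (String × String × Int)
  | kept, [] => ([], kept)
  | kept, c :: rest =>
    if pvIsSource (kept ++ c :: rest) c.1 then
      pvScanA (kept ++ [c]) rest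
    else
      let p := pvScanA kept rest
      (c :: p.1, p.2)

-- A's outer while-loop; fuel = max_iterations - iteration
def pvLoopA : Nat → List (String × String × Int) → List (String × String × Int) → Int →
    List (String × String × Int)
  | 0, result, remaining, _ => result ++ remaining
  | fuel+1, result, remaining, tc =>
    if remaining.isEmpty then result ++ remaining
    else
      let p := pvScanA [] remaining
      if p.1.isEmpty then
        match p.2 with
        | [] => result   -- unreachable: no progress leaves remaining unchanged (nonempty)
        | (d, s, r) :: rest =>
          let temp := "__ssa_tmp_" ++ PySem.Int.toStr tc
          pvLoopA fuel (result ++ [(temp, s, r)]) ((d, temp, r) :: rest) (tc + 1)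
      else
        pvLoopA fuel (result ++ p.1) p.2 tc

def sequentialize_copies_py (copies : List (String × String × Int)) : List (String × String × Int) :=
  if copies.isEmpty then []
  else
    let remaining := copies.filter (fun e => !(e.1 == e.2.1))
    if remaining.isEmpty then []
    else pvLoopA (2 * remaining.length + 10) [] remaining 0

-- ===== PORT B =====
-- _acquire(uses, d, s): if d != s: uses[s] = uses.get(s, 0) + 1
def pvAcq (uses : PySem.Dict String Int) (d s : String) : PySem.Dict String Int :=
  if d == s then uses else uses.insert s (uses.getD s 0 + 1)

-- _release(uses, d, s): if d != s: uses[s] = uses.get(s, 0) - 1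
def pvRel (uses : PySem.Dict String Int) (d s : String) : PySem.Dict String Int :=
  if d == s then uses else uses.insert s (uses.getD s 0 - 1)

-- for d, s, _r in pending: _acquire(uses, d, s)
def pvCnt0 (pending : List (String × String × Int)) : PySem.Dict String Int :=
  pending.foldl (fun c e => pvAcq c e.1 e.2.1) PySem.Dict.empty

-- one pass of B's for-loop: returns (emitted copies, next_pending, updated uses)
def pvPassB : PySem.Dict String Int → List (String × String × Int) →
    List (String × String × Int) × List (String × String × Int) × PySem.Dict String Int
  | cnt, [] => ([], [], cnt)
  | cnt, (d, s, r) :: rest =>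
    if cnt.getD d 0 == 0 then
      let p := pvPassB (pvRel cnt d s) rest
      ((d, s, r) :: p.1, p.2.1, p.2.2)
    else
      let p := pvPassB cnt rest
      (p.1, (d, s, r) :: p.2.1, p.2.2)

-- B's outer while-loop (same safety fuel as A)
def pvLoopB : Nat → List (String × String × Int) → List (String × String × Int) →
    PySem.Dict String Int → Int → List (String × String × Int)
  | 0, result, pending, _, _ => result ++ pending
  | fuel+1, result, pending, cnt, tc =>
    if pending.isEmpty then result ++ pending
    else
      let p := pvPassB cnt pending
      if p.1.isEmpty then
        match p.2.1 with
        | [] => result   -- unreachable: nothing emitted leaves pending unchanged (nonempty)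
        | (d, s, r) :: rest =>
          let temp := "__ssa_tmp_" ++ PySem.Int.toStr tc
          let c2 := pvAcq (pvRel p.2.2 d s) d temp
          pvLoopB fuel (result ++ [(temp, s, r)]) ((d, temp, r) :: rest) c2 (tc + 1)
      else
        pvLoopB fuel (result ++ p.1) p.2.1 p.2.2 tc

def sequentialize_copies_py_alt (copies : List (String × String × Int)) : List (String × String × Int) :=
  let pending := copies.filter (fun e => !(e.1 == e.2.1))
  if pending.isEmpty then []
  else pvLoopB (2 * pending.length + 10) [] pending (pvCnt0 pending) 0

-- ===== PRECONDITION & SPEC =====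
def Spec_sequentialize_copies_py (copies : List (String × String × Int)) (out : List (String × String × Int)) : Prop := out = sequentialize_copies_py_alt copies
instance (copies : List (String × String × Int)) (out : List (String × String × Int)) : Decidable (Spec_sequentialize_copies_py copies out) := by unfold Spec_sequentialize_copies_py; infer_instance

-- ===== CLAIM (what is proved, stated in full; the proofs are below) =====
def Claim_equal_sequentialize_copies_py : Prop := ∀ (copies : List (String × String × Int)), Dom_sequentialize_copies_py copies → Spec_sequentialize_copies_py copies (sequentialize_copies_py copies)

-- ===== LEMMAS AND PROOFS =====

-- number of remaining non-self copies that read x (self-copies never block anyone)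
def pvCountSrc (R : List (String × String × Int)) (x : String) : Nat :=
  R.countP (fun e => (e.2.1 == x) && !(e.1 == e.2.1))

theorem pvCountSrc_cons (a b : String) (c : Int) (R : List (String × String × Int)) (x : String) :
    pvCountSrc ((a, b, c) :: R) x
      = (if b = x ∧ ¬ a = b then 1 else 0) + pvCountSrc R x := by
  simp only [pvCountSrc, List.countP_cons]
  by_cases h1 : b = x <;> by_cases h2 : a = b <;> simp [h1, h2] <;> omega

-- A's filtered membership test is "some non-self copy reads dest"
theorem pvIsSource_eq (M : List (String × String × Int)) (d : String) :
    pvIsSource M d = true ↔ 0 < pvCountSrc M d := by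
  simp only [pvIsSource, List.any_eq_true, Bool.and_eq_true, Bool.not_eq_true',
    beq_eq_false_iff_ne, beq_iff_eq, pvCountSrc, List.countP_pos_iff]
  constructor
  · rintro ⟨e, he, h1, h2⟩
    exact ⟨e, he, by simp [h2, h1]⟩
  · rintro ⟨e, he, hp⟩
    have hp' : e.2.1 = d ∧ ¬ e.1 = e.2.1 := by simpa using hp
    exact ⟨e, he, fun h => hp'.2 (h.trans hp'.1.symm), hp'.1⟩

theorem pvRel_getD (uses : PySem.Dict String Int) (d s x : String) :
    (pvRel uses d s).getD x 0
      = uses.getD x 0 - (if s = x ∧ ¬ d = s then 1 else 0) := by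
  unfold pvRel
  by_cases h : d = s
  · simp [h]
  · by_cases hx : x = s
    · subst hx
      simp [h, PySem.Dict.getD_insert_self]
    · have hne := PySem.Dict.getD_insert_of_ne uses (uses.getD s 0 - 1) 0 hx
      simp [h, hne, Ne.symm hx]

theorem pvAcq_getD (uses : PySem.Dict String Int) (d s x : String) :
    (pvAcq uses d s).getD x 0
      = uses.getD x 0 + (if s = x ∧ ¬ d = s then 1 else 0) := by
  unfold pvAcq
  by_cases h : d = s
  · simp [h]
  · by_cases hx : x = s
    · subst hx
      simp [h, PySem.Dict.getD_insert_self]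
    · have hne := PySem.Dict.getD_insert_of_ne uses (uses.getD s 0 + 1) 0 hx
      simp [h, hne, Ne.symm hx]

-- one pass: B's counted pass computes exactly A's scan, and the counter stays exact
theorem pvPass_eq (rest : List (String × String × Int)) :
    ∀ (kept : List (String × String × Int)) (cnt : PySem.Dict String Int),
    (∀ x, cnt.getD x 0 = (pvCountSrc (kept ++ rest) x : Int)) →
    ∃ em pend cnt',
      pvPassB cnt rest = (em, pend, cnt') ∧
      pvScanA kept rest = (em, kept ++ pend) ∧
      (∀ x, cnt'.getD x 0 = (pvCountSrc (kept ++ pend) x : Int)) := by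
  induction rest with
  | nil =>
    intro kept cnt hcnt
    exact ⟨[], [], cnt, rfl, by simp [pvScanA], by simpa using hcnt⟩
  | cons c rest ih =>
    obtain ⟨d, s, r⟩ := c
    intro kept cnt hcnt
    by_cases hsrc : pvIsSource (kept ++ (d, s, r) :: rest) d = true
    · -- blocked: A keeps it, B keeps it
      have hpos := (pvIsSource_eq _ _).1 hsrc
      have hne : cnt.getD d 0 ≠ 0 := by rw [hcnt d]; omega
      have hbeq : (cnt.getD d 0 == 0) = false := by simp [hne]
      have hcnt' : ∀ x, cnt.getD x 0 = (pvCountSrc ((kept ++ [(d, s, r)]) ++ rest) x : Int) := by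
        intro x; rw [hcnt x]; simp [List.append_assoc]
      obtain ⟨em, pend, cnt', hB, hA, hC⟩ := ih (kept ++ [(d, s, r)]) cnt hcnt'
      refine ⟨em, (d, s, r) :: pend, cnt', ?_, ?_, ?_⟩
      · simp [pvPassB, hbeq, hB]
      · simp [pvScanA, hsrc, hA, List.append_assoc]
      · intro x; rw [hC x]; simp [List.append_assoc]
    · -- ready: A pops it, B emits it and releases its source
      have hsrc' : pvIsSource (kept ++ (d, s, r) :: rest) d = false := by
        simpa using hsrc
      have hnpos : ¬ 0 < pvCountSrc (kept ++ (d, s, r) :: rest) d :=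
        fun hp => hsrc ((pvIsSource_eq _ _).2 hp)
      have hz : pvCountSrc (kept ++ (d, s, r) :: rest) d = 0 := by omega
      have hbeq : (cnt.getD d 0 == 0) = true := by simp [hcnt d, hz]
      have hcnt' : ∀ x, (pvRel cnt d s).getD x 0 = (pvCountSrc (kept ++ rest) x : Int) := by
        intro x
        have hsplit : (pvCountSrc (kept ++ (d, s, r) :: rest) x : Int)
            = (pvCountSrc (kept ++ rest) x : Int)
              + (if s = x ∧ ¬ d = s then 1 else 0) := by
          simp only [pvCountSrc, List.countP_append]
          have := pvCountSrc_cons d s r rest x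
          simp only [pvCountSrc] at this
          rw [this]
          split_ifs <;> push_cast <;> ring
        rw [pvRel_getD, hcnt x, hsplit]
        ring
      obtain ⟨em, pend, cnt', hB, hA, hC⟩ := ih kept (pvRel cnt d s) hcnt'
      exact ⟨(d, s, r) :: em, pend, cnt',
        by simp [pvPassB, hbeq, hB], by simp [pvScanA, hsrc', hA], hC⟩

-- the two outer loops agree as long as the counter is exact
theorem pvLoop_eq (fuel : Nat) :
    ∀ (result R : List (String × String × Int)) (cnt : PySem.Dict String Int) (tc : Int),
    (∀ x, cnt.getD x 0 = (pvCountSrc R x : Int)) →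
    pvLoopA fuel result R tc = pvLoopB fuel result R cnt tc := by
  induction fuel with
  | zero => intro result R cnt tc _; rfl
  | succ fuel ih =>
    intro result R cnt tc hcnt
    by_cases hR : R.isEmpty
    · simp [pvLoopA, pvLoopB, hR]
    · obtain ⟨em, pend, cnt', hB, hA, hC⟩ := pvPass_eq R [] cnt (by simpa using hcnt)
      have hAeq : pvScanA [] R = (em, pend) := by simpa using hA
      have hCp : ∀ x, cnt'.getD x 0 = (pvCountSrc pend x : Int) := by simpa using hC
      by_cases hem : em.isEmpty
      · -- no progress: cycle break (or pend empty, unreachable)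
        match hpend : pend with
        | [] =>
          simp [pvLoopA, pvLoopB, hR, hAeq, hB, hem]
        | (d, s, r) :: rest =>
          subst hpend
          simp only [pvLoopA, pvLoopB, hR, hAeq, hB, hem]
          apply ih
          -- counter exactness after the temp substitution
          intro x
          set temp := "__ssa_tmp_" ++ PySem.Int.toStr tc with htempdef
          rw [pvAcq_getD, pvRel_getD, hCp x, pvCountSrc_cons, pvCountSrc_cons]
          split_ifs <;> push_cast <;> ring
      · simp only [pvLoopA, pvLoopB, hR, hAeq, hB, hem]
        simp only [Bool.false_eq_true, if_false]
        exact ih (result ++ em) pend cnt' tc hCp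
-- initial counter is exact
theorem pvCnt0_foldl (l : List (String × String × Int)) :
    ∀ (cnt : PySem.Dict String Int) (x : String),
    (l.foldl (fun c e => pvAcq c e.1 e.2.1) cnt).getD x 0
      = cnt.getD x 0 + (pvCountSrc l x : Int) := by
  induction l with
  | nil => intro cnt x; simp [pvCountSrc]
  | cons e rest ih =>
    obtain ⟨a, b, c⟩ := e
    intro cnt x
    rw [List.foldl_cons, ih, pvCountSrc_cons, pvAcq_getD]
    split_ifs <;> push_cast <;> ring

theorem pvCnt0_exact (pending : List (String × String × Int)) (x : String) :
    (pvCnt0 pending).getD x 0 = (pvCountSrc pending x : Int) := by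
  rw [pvCnt0, pvCnt0_foldl]
  simp [PySem.Dict.empty, PySem.Dict.getD, PySem.Dict.get?]

-- ===== VERDICT (by name: the statement is the Claim_ definition above) =====
theorem sequentialize_copies_py_spec : Claim_equal_sequentialize_copies_py := by
  intro copies _
  unfold Spec_sequentialize_copies_py sequentialize_copies_py sequentialize_copies_py_alt
  by_cases hc : copies.isEmpty
  · have : copies = [] := List.isEmpty_iff.mp hc
    subst this; simp
  · simp only [hc, Bool.false_eq_true, if_false]
    set rem := copies.filter (fun e => !(e.1 == e.2.1)) with hrem
    by_cases hre : rem.isEmpty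
    · simp [hre]
    · simp only [hre, Bool.false_eq_true, if_false]
      exact pvLoop_eq _ _ _ _ _ (fun x => pvCnt0_exact rem x)
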